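-- pv_equiv track=rewrite | github.com/hemant717556/kg_-hemant717556-_-2021- | Isomorphic.py | helper
-- ===== SOURCE A (Python) =====
-- def helper(s):
--     encode = 0
--     d = {}
--     res = []
--
--     for c in s:
--         if c not in d:
--             d[c] = encode
--             encode += 1
--         res.append(d[c])
--
--     return res
-- ===== SOURCE B (Python) =====
-- def helper(s):
--     # B: no counter and no ordered table of first occurrences: the code of a
--     # character c is the number of DISTINCT characters in the prefix of s
--     # strictly before c's first occurrence.  Compute that once per distinct
--     # char, then map.
--     code = {c: len(set(s[:s.index(c)])) for c in set(s)}
--     return [code[c] for c in s]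
-- ===== Notes on version B (the rewrite author's own statement) =====
-- stated objective: alternative
-- what changed: A's single discover-and-emit loop with a running counter becomes a counter-free characterization: each character's code is computed as the cardinality of the set of distinct characters in the prefix before its first occurrence, evaluated once per distinct char, then mapped over s.
import Mathlib
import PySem

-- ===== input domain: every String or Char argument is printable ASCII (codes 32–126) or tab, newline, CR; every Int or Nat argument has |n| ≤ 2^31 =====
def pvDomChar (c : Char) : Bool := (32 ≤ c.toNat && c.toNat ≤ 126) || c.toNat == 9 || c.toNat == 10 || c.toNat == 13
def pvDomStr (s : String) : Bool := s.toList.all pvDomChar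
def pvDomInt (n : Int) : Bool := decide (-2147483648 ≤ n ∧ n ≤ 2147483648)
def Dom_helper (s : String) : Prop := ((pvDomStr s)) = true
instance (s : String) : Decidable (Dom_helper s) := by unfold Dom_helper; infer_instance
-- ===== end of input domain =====

-- B drops A's running counter: a char's code is the number of distinct chars before its first occurrence; objective: alternative.

-- ===== PORT A =====
-- one iteration of A's loop over state (encode, d, res); d[c] always exists at the append, so getD 0 is exact
def helperStep (st : Int × PySem.Dict Char Int × List Int) (c : Char) :
    Int × PySem.Dict Char Int × List Int :=
  let ed := if st.2.1.contains c then (st.1, st.2.1) else (st.1 + 1, st.2.1.insert c st.1)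
  (ed.1, ed.2, st.2.2 ++ [ed.2.getD c 0])

def helper (s : String) : List Int :=
  (s.toList.foldl helperStep (0, PySem.Dict.empty, [])).2.2

-- ===== PORT B =====
def helper_alt (s : String) : List Int :=
  let cs := s.toList
  -- {c: len(set(s[:s.index(c)])) for c in set(s)}; s.index(c) never raises (c ∈ s), so getD 0 is
  -- exact, and s[:i] with i ≥ 0 is List.take i
  let code := (PySem.Set.ofList cs).foldl
      (fun d c =>
        d.insert c ((PySem.Set.ofList (cs.take ((PySem.List.index? cs c).getD 0))).length : Int))
      PySem.Dict.empty
  -- code[c] never raises (every c of s is a key), so getD 0 is exact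
  cs.map (fun c => code.getD c 0)

-- ===== PRECONDITION & SPEC =====
def Spec_helper (s : String) (out : List Int) : Prop := out = helper_alt s
instance (s : String) (out : List Int) : Decidable (Spec_helper s out) := by unfold Spec_helper; infer_instance

-- ===== CLAIM (what is proved, stated in full; the proofs are below) =====
def Claim_equal_helper : Prop := ∀ (s : String), Dom_helper s → Spec_helper s (helper s)

-- ===== LEMMAS AND PROOFS =====

-- folding Set.add only appends: the start list stays a prefix
lemma foldl_add_prefix (l : List Char) (seen : List Char) :
    ∃ u, l.foldl PySem.Set.add seen = seen ++ u := by
  induction l generalizing seen with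
  | nil => exact ⟨[], by simp⟩
  | cons c t ih =>
    by_cases hc : c ∈ seen
    · have : PySem.Set.add seen c = seen := by
        simp [PySem.Set.add, PySem.Set.contains, List.contains_eq_mem, hc]
      simpa [this] using ih seen
    · have : PySem.Set.add seen c = seen ++ [c] := by
        simp [PySem.Set.add, PySem.Set.contains, List.contains_eq_mem, hc]
      obtain ⟨u, hu⟩ := ih (seen ++ [c])
      exact ⟨[c] ++ u, by simp [this, hu]⟩

-- index in the final order of a char already seen = its index in the seen prefix
lemma index?_foldl_add_of_mem (t seen : List Char) (c : Char) (hc : c ∈ seen) :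
    PySem.List.index? (t.foldl PySem.Set.add seen) c = PySem.List.index? seen c := by
  obtain ⟨u, hu⟩ := foldl_add_prefix t seen
  rw [hu, PySem.List.index?_append_of_mem u hc]

-- membership after folding Set.add = membership in start or in the folded list
lemma mem_foldl_add (l seen : List Char) (x : Char) :
    x ∈ l.foldl PySem.Set.add seen ↔ x ∈ seen ∨ x ∈ l := by
  induction l generalizing seen with
  | nil => simp
  | cons c t ih =>
    by_cases hc : c ∈ seen
    · have h : PySem.Set.add seen c = seen := by
        simp [PySem.Set.add, PySem.Set.contains, List.contains_eq_mem, hc]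
      simp only [List.foldl_cons, h, ih]
      constructor
      · rintro (hx | hx) <;> simp [hx]
      · rintro (hx | hx)
        · exact Or.inl hx
        · rcases List.mem_cons.mp hx with rfl | hx
          · exact Or.inl hc
          · exact Or.inr hx
    · have h : PySem.Set.add seen c = seen ++ [c] := by
        simp [PySem.Set.add, PySem.Set.contains, List.contains_eq_mem, hc]
      simp only [List.foldl_cons, h, ih]
      simp [or_assoc, or_comm, or_left_comm]

-- a char first occurring at position n of l lands in the dedup order at the index equal to
-- the number of distinct chars accumulated from the prefix before it
lemma index?_foldl_add_first (l seen : List Char) (c : Char) (n : Nat)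
    (hseen : c ∉ seen) (hn : PySem.List.index? l c = some n) :
    PySem.List.index? (l.foldl PySem.Set.add seen) c
      = some ((l.take n).foldl PySem.Set.add seen).length := by
  obtain ⟨pre, suf, hl, hlen, hpre⟩ := (PySem.List.index?_eq_some_iff l c n).mp hn
  have htake : l.take n = pre := by
    subst hl; rw [← hlen]; simp
  have hS : c ∉ pre.foldl PySem.Set.add seen := by
    rw [mem_foldl_add]; rintro (h | h) <;> [exact hseen h; exact hpre h]
  have hadd : PySem.Set.add (pre.foldl PySem.Set.add seen) c
      = pre.foldl PySem.Set.add seen ++ [c] := by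
    simp [PySem.Set.add, PySem.Set.contains, List.contains_eq_mem, hS]
  rw [htake, hl, List.foldl_append, List.foldl_cons, hadd]
  obtain ⟨u, hu⟩ := foldl_add_prefix suf (pre.foldl PySem.Set.add seen ++ [c])
  rw [hu, PySem.List.index?_append_of_mem u (by simp)]
  exact PySem.List.index?_append_singleton_self _ _ hS

-- a key off the list leaves the fold-built dict untouched at that key
lemma get?_foldl_insert_not_mem (f : Char → Int) (ks : List Char) (d : PySem.Dict Char Int)
    (c : Char) (hc : c ∉ ks) :
    (ks.foldl (fun d k => d.insert k (f k)) d).get? c = d.get? c := by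
  induction ks generalizing d with
  | nil => rfl
  | cons k t ih =>
    have hck : c ≠ k := fun h => hc (by simp [h])
    rw [List.foldl_cons, ih _ (fun h => hc (by simp [h])),
      PySem.Dict.get?_insert_of_ne _ _ hck]

-- a key on a duplicate-free list gets exactly its computed value
lemma get?_foldl_insert_mem (f : Char → Int) (ks : List Char) (d : PySem.Dict Char Int)
    (c : Char) (hnd : ks.Nodup) (hc : c ∈ ks) :
    (ks.foldl (fun d k => d.insert k (f k)) d).get? c = some (f c) := by
  induction ks generalizing d with
  | nil => cases hc
  | cons k t ih =>
    rcases List.mem_cons.mp hc with rfl | hct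
    · rw [List.foldl_cons, get?_foldl_insert_not_mem f t _ c (List.nodup_cons.mp hnd).1,
        PySem.Dict.get?_insert_self]
    · exact ih _ (List.nodup_cons.mp hnd).2 hct

-- main loop invariant: with d the index table of `seen` and encode = seen.length,
-- A's loop over rest appends exactly the first-occurrence indices taken in the final order
lemma loopA (rest seen : List Char) (d : PySem.Dict Char Int) (res : List Int)
    (hd : ∀ x, d.get? x = (PySem.List.index? seen x).map (fun n => (n : Int))) :
    (rest.foldl helperStep ((seen.length : Int), d, res)).2.2
      = res ++ rest.map (fun c =>
          (((PySem.List.index? (rest.foldl PySem.Set.add seen) c).getD 0 : Nat) : Int)) := by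
  induction rest generalizing seen d res with
  | nil => simp
  | cons c t ih =>
    have hcontains : d.contains c = (PySem.List.index? seen c).isSome := by
      rw [PySem.Dict.contains_eq_isSome_get?, hd c]
      cases PySem.List.index? seen c <;> simp
    by_cases hc : c ∈ seen
    · -- seen char: dict unchanged, emit its old index
      obtain ⟨k, hk⟩ := Option.isSome_iff_exists.mp
        ((PySem.List.index?_isSome_iff seen c).mpr hc)
      have hcon : d.contains c = true := by rw [hcontains, hk]; rfl
      have hgd : d.getD c 0 = (k : Int) := by
        rw [PySem.Dict.getD_eq_get?_getD, hd c, hk]; rfl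
      have hadd : PySem.Set.add seen c = seen := by
        simp [PySem.Set.add, PySem.Set.contains, List.contains_eq_mem, hc]
      simp only [List.foldl_cons, helperStep, hcon, if_true, List.map_cons, hadd, hgd]
      rw [ih seen d (res ++ [(k : Int)]) hd]
      rw [index?_foldl_add_of_mem t seen c hc, hk]
      simp
    · -- new char: insert at index seen.length, emit it
      have hcon : d.contains c = false := by
        rw [hcontains, (PySem.List.index?_eq_none_iff seen c).mpr hc]; rfl
      have hadd : PySem.Set.add seen c = seen ++ [c] := by
        simp [PySem.Set.add, PySem.Set.contains, List.contains_eq_mem, hc]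
      have hd' : ∀ x, (d.insert c (seen.length : Int)).get? x
          = (PySem.List.index? (seen ++ [c]) x).map (fun n => (n : Int)) := by
        intro x
        by_cases hx : x = c
        · subst hx
          rw [PySem.Dict.get?_insert_self d x (seen.length : Int),
            PySem.List.index?_append_singleton_self seen x hc]
          rfl
        · rw [PySem.Dict.get?_insert_of_ne d (seen.length : Int) hx, hd x]
          by_cases hxs : x ∈ seen
          · rw [PySem.List.index?_append_of_mem [c] hxs]
          · rw [(PySem.List.index?_eq_none_iff seen x).mpr hxs,
              (PySem.List.index?_eq_none_iff (seen ++ [c]) x).mpr (by simp [hxs, hx])]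
      have hgd : (d.insert c (seen.length : Int)).getD c 0 = (seen.length : Int) := by
        rw [PySem.Dict.getD_eq_get?_getD, PySem.Dict.get?_insert_self d c (seen.length : Int)]; rfl
      simp only [List.foldl_cons, helperStep, hcon, Bool.false_eq_true, if_false,
        List.map_cons, hadd, hgd]
      have hlen : ((seen.length : Int) + 1) = (((seen ++ [c]).length : Nat) : Int) := by
        simp
      rw [hlen, ih (seen ++ [c]) (d.insert c (seen.length : Int)) (res ++ [(seen.length : Int)]) hd']
      have hidx : PySem.List.index? (t.foldl PySem.Set.add (seen ++ [c])) c
          = some seen.length := by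
        rw [index?_foldl_add_of_mem t (seen ++ [c]) c (by simp),
          PySem.List.index?_append_singleton_self seen c hc]
      rw [hidx]
      simp

-- ===== VERDICT (by name: the statement is the Claim_ definition above) =====
theorem helper_spec : Claim_equal_helper := by
  intro s _
  show helper s = helper_alt s
  unfold helper helper_alt
  have h0 : ∀ x, (PySem.Dict.empty : PySem.Dict Char Int).get? x
      = (PySem.List.index? ([] : List Char) x).map (fun n => (n : Int)) := by
    intro x; simp [PySem.Dict.get?_empty, PySem.List.index?]
  have hA := loopA s.toList [] PySem.Dict.empty [] h0
  simp only [List.nil_append, List.length_nil, Nat.cast_zero] at hA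
  rw [hA]
  show _ = List.map (fun c => ((PySem.Set.ofList s.toList).foldl
      (fun d c =>
        d.insert c ((PySem.Set.ofList (s.toList.take ((PySem.List.index? s.toList c).getD 0))).length : Int))
      PySem.Dict.empty).getD c 0) s.toList
  apply List.map_congr_left
  intro c hc
  obtain ⟨n, hn⟩ := Option.isSome_iff_exists.mp
    ((PySem.List.index?_isSome_iff s.toList c).mpr hc)
  have hB : ((PySem.Set.ofList s.toList).foldl
      (fun d c =>
        d.insert c ((PySem.Set.ofList (s.toList.take ((PySem.List.index? s.toList c).getD 0))).length : Int))
      PySem.Dict.empty).getD c 0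
      = ((PySem.Set.ofList (s.toList.take n)).length : Int) := by
    rw [PySem.Dict.getD_eq_get?_getD,
      get?_foldl_insert_mem _ _ _ c (PySem.Set.nodup_ofList s.toList)
        ((PySem.Set.mem_ofList _ _).mpr hc)]
    simp only [hn, Option.getD_some]
  rw [hB]
  have := index?_foldl_add_first s.toList [] c n (by simp) hn
  rw [PySem.Set.ofList_eq_foldl, this]
  simp
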